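-- pv_equiv track=rewrite | github.com/Cantonyan/LaGou_Analysis | Data_Wrangling.py | Judge_Skill
-- ===== SOURCE A (Python) =====
-- def Judge_Skill(DocList): #遍历技能，转换为数组
--     WordList = ['python' ,'sql' ,'mysql', 'hadoop', 'excel' ,'r' ,'spss' ,'sas' ,'matlab','java', '分类', '聚类', '关联', '回归']
--     ReturnVec = [0]*len(WordList)
--     for word in DocList:
--         if word.lower() in WordList:#改为小写遍历
--             ReturnVec[WordList.index(word.lower())] = 1 #存入列表
--     if ReturnVec[1] or ReturnVec[2]:#判断是否存在SQL
--         ReturnVec[1] = 1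
--     del ReturnVec[2] #删除重复SQL列
--     return ReturnVec
-- ===== SOURCE B (Python) =====
-- def Judge_Skill(DocList):
--     WordList = ['python', 'sql', 'mysql', 'hadoop', 'excel', 'r', 'spss', 'sas', 'matlab', 'java', '分类', '聚类', '关联', '回归']
--     lowered = {word.lower() for word in DocList}
--     ReturnVec = [1 if w in lowered else 0 for w in WordList]
--     if ReturnVec[1] or ReturnVec[2]:
--         ReturnVec[1] = 1
--     del ReturnVec[2]
--     return ReturnVec
-- ===== Notes on version B (the rewrite author's own statement) =====
-- stated objective: idiomatic
-- what changed: B inverts the traversal: instead of scanning DocList and writing into the vector via list.index on each hit, it builds a set of lowercased DocList words once and constructs the vector by a comprehension over the fixed WordList (membership test per feature), then applies the same sql/mysql merge and column deletion. (set membership replaces per-word linear scans of WordList)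
import Mathlib
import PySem

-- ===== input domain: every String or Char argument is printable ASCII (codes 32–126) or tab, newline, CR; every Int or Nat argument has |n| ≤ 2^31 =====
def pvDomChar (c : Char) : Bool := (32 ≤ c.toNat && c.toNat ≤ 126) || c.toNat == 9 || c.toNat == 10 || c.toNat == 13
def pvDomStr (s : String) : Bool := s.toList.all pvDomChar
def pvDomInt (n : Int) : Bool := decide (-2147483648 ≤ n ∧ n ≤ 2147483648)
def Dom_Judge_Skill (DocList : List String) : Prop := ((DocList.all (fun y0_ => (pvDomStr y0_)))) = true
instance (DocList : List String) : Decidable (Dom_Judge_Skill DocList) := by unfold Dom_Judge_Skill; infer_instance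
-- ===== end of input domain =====

-- B inverts the traversal: it builds the set of lowercased DocList words once and maps the fixed
-- WordList through a membership test, instead of scanning DocList and writing via list.index (idiomatic).

-- the fixed skill word list shared by both Pythons
def pvWordList : List String := ["python","sql","mysql","hadoop","excel","r","spss","sas","matlab","java","分类","聚类","关联","回归"]

-- ===== PORT A =====
-- one iteration of A's for-loop body: if word.lower() in WordList: ReturnVec[WordList.index(word.lower())] = 1
def pvStepA (vec : List Int) (word : String) : List Int :=
  if PySem.Str.lower word ∈ pvWordList then
    match PySem.List.index? pvWordList (PySem.Str.lower word) with
    | some i => vec.set i 1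
    | none => vec
  else vec

def Judge_Skill (DocList : List String) : List Int :=
  let vec := DocList.foldl pvStepA (List.replicate pvWordList.length (0 : Int))
  let vec2 := if PySem.List.pyGetD vec 1 (0:Int) ≠ 0 ∨ PySem.List.pyGetD vec 2 (0:Int) ≠ 0
              then PySem.List.pySetD vec 1 1 else vec
  vec2.eraseIdx 2

-- ===== PORT B =====
def Judge_Skill_alt (DocList : List String) : List Int :=
  let lowered : PySem.Set String := PySem.Set.ofList (DocList.map PySem.Str.lower)
  let vec := pvWordList.map (fun w => if PySem.Set.contains lowered w then (1:Int) else 0)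
  let vec2 := if PySem.List.pyGetD vec 1 (0:Int) ≠ 0 ∨ PySem.List.pyGetD vec 2 (0:Int) ≠ 0
              then PySem.List.pySetD vec 1 1 else vec
  vec2.eraseIdx 2

-- ===== PRECONDITION & SPEC =====
def Spec_Judge_Skill (DocList : List String) (out : List Int) : Prop := out = Judge_Skill_alt DocList
instance (DocList : List String) (out : List Int) : Decidable (Spec_Judge_Skill DocList out) := by unfold Spec_Judge_Skill; infer_instance

-- ===== CLAIM (what is proved, stated in full; the proofs are below) =====
def Claim_equal_Judge_Skill : Prop := ∀ (DocList : List String), Dom_Judge_Skill DocList → Spec_Judge_Skill DocList (Judge_Skill DocList)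

-- ===== LEMMAS AND PROOFS =====

-- setting the entry at a's index to 1 in a 0/1 feature vector over a Nodup word list
lemma set_index_map (l : List String) (hnd : l.Nodup) (f : String → Bool) (a : String) (i : Nat)
    (h : PySem.List.index? l a = some i) :
    (l.map (fun w => if f w then (1:Int) else 0)).set i 1
      = l.map (fun w => if (f w || (w == a)) then (1:Int) else 0) := by
  induction l generalizing i with
  | nil => simp [PySem.List.index?] at h
  | cons b l' ih =>
    by_cases hb : b = a
    · subst hb
      rw [PySem.List.index?_cons_self] at h
      obtain rfl : i = 0 := by simpa using h.symm
      have hnot : b ∉ l' := (List.nodup_cons.mp hnd).1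
      simp only [List.map_cons, List.set_cons_zero, beq_self_eq_true, Bool.or_true]
      congr 1
      apply List.map_congr_left
      intro w hw
      have : w ≠ b := fun e => hnot (e ▸ hw)
      simp [this]
    · rw [PySem.List.index?_cons_of_ne l' hb] at h
      obtain ⟨j, hj, rfl⟩ := Option.map_eq_some_iff.mp h
      have : (b == a) = false := by simp [hb]
      simp only [List.map_cons, List.set_cons_succ, this, Bool.or_false]
      congr 1
      exact ih (List.nodup_cons.mp hnd).2 j hj

-- one loop iteration of A turns the feature predicate f into (f ∨ · = lower x)
lemma step_map (f : String → Bool) (x : String) :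
    pvStepA (pvWordList.map (fun w => if f w then (1:Int) else 0)) x
      = pvWordList.map (fun w => if (f w || (w == PySem.Str.lower x)) then (1:Int) else 0) := by
  by_cases h : PySem.Str.lower x ∈ pvWordList
  · obtain ⟨i, hi⟩ := Option.isSome_iff_exists.mp ((PySem.List.index?_isSome_iff pvWordList _).mpr h)
    simp only [pvStepA, if_pos h, hi]
    exact set_index_map pvWordList (by decide) f _ i hi
  · simp only [pvStepA, if_neg h]
    apply List.map_congr_left
    intro w hw
    have : (w == PySem.Str.lower x) = false := by
      simp only [beq_eq_false_iff_ne]; exact fun e => h (e ▸ hw)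
    simp [this]

-- A's whole loop computes membership of each WordList word among the lowered DocList words
lemma loop_eq (doc : List String) (f : String → Bool) :
    doc.foldl pvStepA (pvWordList.map (fun w => if f w then (1:Int) else 0))
      = pvWordList.map (fun w => if (f w || decide (w ∈ doc.map PySem.Str.lower)) then (1:Int) else 0) := by
  induction doc generalizing f with
  | nil => simp
  | cons x xs ih =>
    rw [List.foldl_cons, step_map, ih]
    apply List.map_congr_left
    intro w _
    by_cases he : w = PySem.Str.lower x <;> simp [he, Bool.or_assoc]

-- ===== VERDICT (by name: the statement is the Claim_ definition above) =====
theorem Judge_Skill_spec : Claim_equal_Judge_Skill := by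
  intro DocList _
  unfold Spec_Judge_Skill Judge_Skill Judge_Skill_alt
  have hrep : List.replicate pvWordList.length (0:Int)
      = pvWordList.map (fun w => if (fun _ : String => false) w then (1:Int) else 0) := by
    simp
  rw [hrep, loop_eq]
  have hvec : pvWordList.map (fun w => if (false || decide (w ∈ DocList.map PySem.Str.lower)) then (1:Int) else 0)
      = pvWordList.map (fun w => if PySem.Set.contains (PySem.Set.ofList (DocList.map PySem.Str.lower)) w then (1:Int) else 0) := by
    apply List.map_congr_left
    intro w _
    by_cases hm : w ∈ DocList.map PySem.Str.lower
    · simp [hm, PySem.Set.mem_ofList]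
    · simp [hm, PySem.Set.mem_ofList]
  rw [hvec]
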